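-- pv_equiv track=rewrite | github.com/devi-prasad/data-visualization | examples/gmail-analyzer/mktbl.py | grep_one_email_id
-- ===== SOURCE A (Python) =====
-- punctuations = [' ', '\t', '\n', ',', ';', '<', '>', '/', '\"', '\'', '&', '#', '=']
--
-- def grep_one_email_id(s, cur=0):
--   assert(s is not None and cur >= 0)
--   ##
--   l = s.find('<', cur)
--   r = 0
--   eid = None
--   if (l >= cur):
--     r = s.find('>', l)
--     if (r > l and s.find('@', l, r) > -1):
--       eid = (s[l+1:r].split())[0]
--   ##
--   if eid is None: # may be the email id is not surrounded by angle braces < ... >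
--     l = r = -1
--     mid = s.find('@', cur) # abcd@wxyz
--     if (mid >= 0):
--       l = r = mid
--       slen = len(s)
--       while (l >= 0 and s[l] not in punctuations):
--         l = l - 1
--       while (r < slen and s[r] not in punctuations):
--         r = r + 1
--       eid = (s[l+1: r].split())[0]
--   ##
--     assert (eid != None or l == -1 or r == -1 or s.find('@', cur) == -1)
--   ##
--   return (r, eid)
-- ===== SOURCE B (Python) =====
-- punctuations = [' ', '\t', '\n', ',', ';', '<', '>', '/', '\"', '\'', '&', '#', '=']
--
-- def grep_one_email_id(s, cur=0):
--   assert(s is not None and cur >= 0)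
--   # phase 1: first '<...>' pair from cur, accepted only when it encloses an '@'
--   l = s.find('<', cur)
--   if l != -1:
--     r = s.find('>', l + 1)
--     if r != -1 and '@' in s[l + 1:r]:
--       return (r, s[l + 1:r].split()[0])
--   # phase 2: one forward pass over s tracking the start of the current
--   # punctuation-free run; emit the run that contains the first '@' at/after cur
--   mid = s.find('@', cur)
--   if mid == -1:
--     return (-1, None)
--   start = 0
--   for i, ch in enumerate(s):
--     if ch in punctuations:
--       if start <= mid < i:
--         return (i, s[start:i].split()[0])
--       start = i + 1
--   return (len(s), s[start:].split()[0])
-- ===== Notes on version B (the rewrite author's own statement) =====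
-- stated objective: alternative
-- what changed: Phase 2 replaces the two index-walking while loops around the at-sign (A scans left then right character by character from the found position) with a single forward pass over enumerate(s) that tracks the start of the current punctuation-free run and emits the run containing the first at-sign; phase 1 restates A's guards via a find-from-the-next-index and a substring membership test on the slice instead of A's ranged three-argument find.
import Mathlib
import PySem

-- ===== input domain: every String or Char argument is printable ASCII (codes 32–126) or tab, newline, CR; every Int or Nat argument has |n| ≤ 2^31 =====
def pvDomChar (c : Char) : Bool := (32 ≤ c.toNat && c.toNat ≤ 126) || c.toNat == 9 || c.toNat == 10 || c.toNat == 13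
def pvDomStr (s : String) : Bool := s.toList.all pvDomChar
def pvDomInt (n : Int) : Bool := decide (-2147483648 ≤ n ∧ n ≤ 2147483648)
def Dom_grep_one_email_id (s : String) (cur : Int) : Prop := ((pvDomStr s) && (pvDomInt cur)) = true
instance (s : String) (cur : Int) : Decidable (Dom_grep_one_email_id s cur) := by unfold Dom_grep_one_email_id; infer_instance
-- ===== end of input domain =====

-- B replaces A's two character-walking while loops around the '@' by a single forward
-- pass over enumerate(s) tracking the start of the current punctuation-free run
-- (objective: alternative decomposition, same O(n) cost).

-- ===== PORT A =====

def pvPunct : List Char := [' ', '\t', '\n', ',', ';', '<', '>', '/', '\"', '\'', '&', '#', '=']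

-- shared literal port of the Python expression `X.split()[0]` (both sources contain it
-- verbatim); `none` = the (unreachable) IndexError of `[0]` on an empty split
def pvSplitHead (t : List Char) : Option String :=
  (PySem.List.pyGet? (PySem.Chars.split₀ t) 0).map String.mk

-- `while (l >= 0 and s[l] not in punctuations): l = l - 1`; the `none` branch is where
-- Python's s[l] would raise (A never reaches it: l starts at an in-range index)
def pvWalkL (cs : List Char) (l : Int) : Int :=
  if h : 0 ≤ l then
    match PySem.List.pyGet? cs l with
    | some c => if pvPunct.contains c then l else pvWalkL cs (l - 1)
    | none => l
  else l
termination_by (l + 1).toNat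
decreasing_by omega

-- `while (r < slen and s[r] not in punctuations): r = r + 1`
def pvWalkR (cs : List Char) (slen : Int) (r : Int) : Int :=
  if h : r < slen then
    match PySem.List.pyGet? cs r with
    | some c => if pvPunct.contains c then r else pvWalkR cs slen (r + 1)
    | none => r
  else r
termination_by (slen - r).toNat
decreasing_by omega

def grep_one_email_id (s : String) (cur : Int) : Int × Option String :=
  let cs := s.toList
  let l := PySem.Chars.findFrom cs ['<'] cur none
  let re : Int × Option String :=
    if cur ≤ l then
      let r := PySem.Chars.findFrom cs ['>'] l none
      if l < r ∧ -1 < PySem.Chars.findFrom cs ['@'] l (some r) then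
        (r, pvSplitHead (PySem.Chars.slice cs (some (l + 1)) (some r)))
      else (r, none)
    else (0, none)
  if re.2 = none then
    let mid := PySem.Chars.findFrom cs ['@'] cur none
    if 0 ≤ mid then
      let slen : Int := cs.length
      let lw := pvWalkL cs mid
      let rw := pvWalkR cs slen mid
      (rw, pvSplitHead (PySem.Chars.slice cs (some (lw + 1)) (some rw)))
    else (-1, none)
  else re

-- ===== PORT B =====

-- the `for i, ch in enumerate(s):` loop of B with its two early returns
def pvScan (cs : List Char) (mid : Int) : List (Int × Char) → Int → Int × Option String
  | [], start => ((cs.length : Int), pvSplitHead (PySem.Chars.slice cs (some start) none))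
  | (i, ch) :: rest, start =>
    if pvPunct.contains ch then
      if start ≤ mid ∧ mid < i then
        (i, pvSplitHead (PySem.Chars.slice cs (some start) (some i)))
      else pvScan cs mid rest (i + 1)
    else pvScan cs mid rest start

-- B's phase 2 (reached by falling through phase 1's early returns)
def pvBare (cs : List Char) (cur : Int) : Int × Option String :=
  let mid := PySem.Chars.findFrom cs ['@'] cur none
  if mid = -1 then (-1, none)
  else pvScan cs mid (PySem.List.enumerate cs 0) 0

def grep_one_email_id_alt (s : String) (cur : Int) : Int × Option String :=
  let cs := s.toList
  let l := PySem.Chars.findFrom cs ['<'] cur none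
  if l ≠ -1 then
    let r := PySem.Chars.findFrom cs ['>'] (l + 1) none
    if r ≠ -1 ∧ PySem.Chars.isIn ['@'] (PySem.Chars.slice cs (some (l + 1)) (some r)) then
      (r, pvSplitHead (PySem.Chars.slice cs (some (l + 1)) (some r)))
    else pvBare cs cur
  else pvBare cs cur

-- ===== PRECONDITION & SPEC =====
-- Pre_ excludes exactly cur < 0, where A's `assert cur >= 0` raises AssertionError.
def Pre_grep_one_email_id (s : String) (cur : Int) : Prop := 0 ≤ cur
instance (s : String) (cur : Int) : Decidable (Pre_grep_one_email_id s cur) := by unfold Pre_grep_one_email_id; infer_instance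
def pvWitness_grep_one_email_id : String × Int := ("to <a@b> hi", 0)

def Spec_grep_one_email_id (s : String) (cur : Int) (out : Int × Option String) : Prop := out = grep_one_email_id_alt s cur
instance (s : String) (cur : Int) (out : Int × Option String) : Decidable (Spec_grep_one_email_id s cur out) := by unfold Spec_grep_one_email_id; infer_instance

-- ===== CLAIM (what is proved, stated in full; the proofs are below) =====
def Claim_equal_grep_one_email_id : Prop := ∀ (s : String) (cur : Int), Dom_grep_one_email_id s cur → Pre_grep_one_email_id s cur → Spec_grep_one_email_id s cur (grep_one_email_id s cur)

-- ===== LEMMAS AND PROOFS =====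

-- `[c]` is a prefix of `xs.drop j` iff `xs[j]? = some c`
theorem pvPrefixSingle (c : Char) (xs : List Char) (j : Nat) :
    [c] <+: xs.drop j ↔ xs[j]? = some c := by
  rw [show [c] <+: xs.drop j ↔ (xs.drop j).head? = some c by
    cases h : xs.drop j with
    | nil => simp
    | cons a t =>
      simp only [List.cons_prefix_cons, List.nil_prefix, and_true, List.head?_cons,
        Option.some.injEq]
      exact eq_comm]
  rw [List.head?_drop]

-- find xs [c] = -1 iff c does not occur
theorem pvFindSingleNeg (xs : List Char) (c : Char) :
    PySem.Chars.find xs [c] = -1 ↔ c ∉ xs := by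
  rw [PySem.Chars.find_eq_neg_one_iff, List.singleton_infix_iff]

-- when find succeeds it points at the first occurrence
theorem pvFindSingleSpec (xs : List Char) (c : Char) (h : PySem.Chars.find xs [c] ≠ -1) :
    0 ≤ PySem.Chars.find xs [c] ∧
    xs[(PySem.Chars.find xs [c]).toNat]? = some c ∧
    (∀ i < (PySem.Chars.find xs [c]).toNat, xs[i]? ≠ some c) := by
  have h0 : 0 ≤ PySem.Chars.find xs [c] := by
    have := PySem.Chars.neg_one_le_find xs [c]; omega
  obtain ⟨h1, h2⟩ := PySem.Chars.find_spec h0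
  exact ⟨h0, (pvPrefixSingle c xs _).mp h1, fun i hi hc => h2 i hi ((pvPrefixSingle c xs i).mpr hc)⟩

-- uniqueness: a first occurrence determines find
theorem pvFindSingleEq (xs : List Char) (c : Char) (j : Nat)
    (h1 : xs[j]? = some c) (h2 : ∀ i < j, xs[i]? ≠ some c) :
    PySem.Chars.find xs [c] = (j : Int) := by
  have hne : PySem.Chars.find xs [c] ≠ -1 := by
    rw [Ne, pvFindSingleNeg]
    exact fun hmem => hmem (List.mem_of_getElem? h1)
  obtain ⟨h0, ha, hb⟩ := pvFindSingleSpec xs c hne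
  set t := (PySem.Chars.find xs [c]).toNat with ht
  have : t = j := by
    rcases Nat.lt_trichotomy t j with h | h | h
    · exact absurd ha (h2 t h)
    · exact h
    · exact absurd h1 (hb j h)
  omega

-- find over a cons whose head is not c
theorem pvFindConsSingle (a c : Char) (xs : List Char) (hne : a ≠ c) :
    PySem.Chars.find (a :: xs) [c] =
      if PySem.Chars.find xs [c] = -1 then -1 else PySem.Chars.find xs [c] + 1 := by
  by_cases h : PySem.Chars.find xs [c] = -1
  · simp only [h, if_pos]
    rw [pvFindSingleNeg] at h ⊢
    simp [hne.symm, h]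
  · simp only [h, if_neg, not_false_iff]
    obtain ⟨h0, ha, hb⟩ := pvFindSingleSpec xs c h
    set j := (PySem.Chars.find xs [c]).toNat with hj
    have : PySem.Chars.find (a :: xs) [c] = ((j + 1 : Nat) : Int) := by
      apply pvFindSingleEq
      · simpa using ha
      · intro i hi
        cases i with
        | zero => simpa using hne
        | succ i' => simpa using hb i' (by omega)
    omega

-- findFrom from a nonnegative start, unfolded
theorem pvFindFromUnfold (cs sub : List Char) (k : Int) (hk : 0 ≤ k) :
    PySem.Chars.findFrom cs sub k none =
      if (cs.length : Int) < k then -1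
      else if PySem.Chars.find (cs.drop k.toNat) sub = -1 then -1
      else k + PySem.Chars.find (cs.drop k.toNat) sub := by
  simp only [PySem.Chars.findFrom]
  rw [if_neg (by omega : ¬ k < 0)]
  by_cases h : (cs.length : Int) < k
  · rw [if_pos (by omega), if_pos h]
  · rw [if_neg (by omega), if_neg h]
    simp only [Int.toNat_natCast, List.take_length]

-- findFrom with an explicit in-range end, unfolded
theorem pvFindFromEndUnfold (cs sub : List Char) (a b : Int)
    (ha : 0 ≤ a) (hab : a ≤ b) (hb : b ≤ (cs.length : Int)) :
    PySem.Chars.findFrom cs sub a (some b) =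
      if PySem.Chars.find ((cs.take b.toNat).drop a.toNat) sub = -1 then -1
      else a + PySem.Chars.find ((cs.take b.toNat).drop a.toNat) sub := by
  simp only [PySem.Chars.findFrom, if_neg (by omega : ¬ a < 0),
    if_neg (by omega : ¬ (cs.length : Int) < b), if_neg (by omega : ¬ b < 0),
    if_neg (by omega : ¬ b < a)]

-- slice with nonnegative in-range bounds is drop-then-take
theorem pvSliceEq (cs : List Char) (a b : Int) (ha : 0 ≤ a) (han : a ≤ (cs.length : Int))
    (hb : 0 ≤ b) (hbn : b ≤ (cs.length : Int)) :
    PySem.Chars.slice cs (some a) (some b) = (cs.drop a.toNat).take (b.toNat - a.toNat) := by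
  simp only [PySem.Chars.slice_eq_listSlice, PySem.List.slice, PySem.List.clampIdx,
    if_neg (by omega : ¬ a < 0), if_neg (by omega : ¬ b < 0)]
  rw [show min a.toNat cs.length = a.toNat by omega, show min b.toNat cs.length = b.toNat by omega]

theorem pvSliceAll (cs : List Char) (a : Int) (ha : 0 ≤ a) :
    PySem.Chars.slice cs (some a) none = PySem.Chars.slice cs (some a) (some (cs.length : Int)) := by
  simp only [PySem.Chars.slice_eq_listSlice, PySem.List.slice, PySem.List.clampIdx,
    if_neg (by omega : ¬ a < 0), if_neg (by omega : ¬ (cs.length : Int) < 0)]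
  rw [show min (cs.length : Int).toNat cs.length = cs.length by omega]

-- the updated `start` after B's scan has processed indices [i, b)
def pvStRun (cs : List Char) (b i st : Nat) : Nat :=
  if h : i < b then
    pvStRun cs b (i + 1)
      (match cs[i]? with
       | some c => if pvPunct.contains c then i + 1 else st
       | none => st)
  else st
termination_by b - i




-- the scan, before reaching index mid, only accumulates pvStRun

-- the scan, past mid with start ≤ mid, is A's right walk plus the common slice

theorem pvWalkLLe (cs : List Char) (l : Int) : pvWalkL cs l ≤ l := by
  induction l using pvWalkL.induct (cs := cs) with
  | _ =>
    first
      | (unfold pvWalkL; simp_all; done)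
      | (unfold pvWalkL; simp_all; omega)
      | (unfold pvWalkL; rw [if_neg (by omega)])


theorem pvStRunPeel (cs : List Char) (b i st : Nat) (h : i < b) :
    pvStRun cs b i st =
      (match cs[b-1]? with
       | some c => if pvPunct.contains c then b else pvStRun cs (b - 1) i st
       | none => pvStRun cs (b - 1) i st) := by
  induction hb : b - i generalizing i st with
  | zero => omega
  | succ k ih =>
    rw [pvStRun, dif_pos h]
    by_cases hib : i + 1 < b
    · rw [ih _ _ hib (by omega)]
      have hib2 : i < b - 1 := by omega
      conv_rhs =>
        rw [show pvStRun cs (b-1) i st = pvStRun cs (b-1) (i+1)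
              (match cs[i]? with
               | some c => if pvPunct.contains c then i + 1 else st
               | none => st) by rw [pvStRun, dif_pos hib2]]
    · have hbi : b = i + 1 := by omega
      subst hbi
      simp only [Nat.add_sub_cancel]
      rw [show ∀ st', pvStRun cs (i+1) (i+1) st' = st' from fun st' => by
            rw [pvStRun, dif_neg (by omega)]]
      rw [show pvStRun cs i i st = st by rw [pvStRun, dif_neg (by omega)]]


theorem pvStRunBridge (cs : List Char) (b : Nat) (hb : b ≤ cs.length) :
    (pvStRun cs b 0 0 : Int) = pvWalkL cs ((b : Int) - 1) + 1 := by
  induction b with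
  | zero =>
    rw [pvStRun, dif_neg (by omega), pvWalkL, dif_neg (by omega)]
    norm_num
  | succ n ih =>
    rw [pvStRunPeel cs (n+1) 0 0 (by omega)]
    simp only [Nat.add_sub_cancel]
    have hn : n < cs.length := by omega
    rw [List.getElem?_eq_getElem hn]
    have hwl : pvWalkL cs (((n+1 : Nat) : Int) - 1) = pvWalkL cs (n : Int) := by
      norm_num
    rw [hwl, pvWalkL, dif_pos (by omega : (0:Int) ≤ (n : Int))]
    have hget : PySem.List.pyGet? cs (n : Int) = some cs[n] := by
      simp [pysem, List.getElem?_eq_getElem hn]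
    rw [hget]
    by_cases hc : pvPunct.contains cs[n]
    · simp only [hc, if_pos]
      push_cast; ring
    · simp only [hc, Bool.false_eq_true, if_false]
      rw [ih (by omega)]


theorem pvEnumCons (c : Char) (rest : List Char) (k : Int) :
    PySem.List.enumerate (c :: rest) k = (k, c) :: PySem.List.enumerate rest (k + 1) := by
  simp [PySem.List.enumerate]


theorem pvDropSucc (cs : List Char) (i : Nat) (h : i < cs.length) :
    cs.drop i = cs[i] :: cs.drop (i + 1) := by
  exact (List.getElem_cons_drop h).symm


theorem pvScanTail (cs : List Char) (m : Nat) (hm : m < cs.length) :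
    ∀ i st : Nat, m < i → i ≤ cs.length → st ≤ m →
      pvScan cs (m : Int) (PySem.List.enumerate (cs.drop i) (i : Int)) (st : Int) =
      (pvWalkR cs (cs.length : Int) (i : Int),
       pvSplitHead (PySem.Chars.slice cs (some (st : Int))
         (some (pvWalkR cs (cs.length : Int) (i : Int))))) := by
  intro i st hmi hin hst
  induction hni : cs.length - i generalizing i with
  | zero =>
    have : i = cs.length := by omega
    subst this
    rw [List.drop_length]
    rw [show PySem.List.enumerate ([] : List Char) ((cs.length : Nat) : Int) = [] from rfl]
    rw [pvScan]
    rw [show pvWalkR cs (cs.length : Int) ((cs.length : Nat) : Int) = (cs.length : Int) by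
      rw [pvWalkR, dif_neg (by omega)]]
    rw [pvSliceAll cs (st : Int) (by omega)]
  | succ k ih =>
    have hilt : i < cs.length := by omega
    rw [pvDropSucc cs i hilt, pvEnumCons]
    rw [pvScan]
    rw [show pvWalkR cs (cs.length : Int) (i : Int) =
          (if pvPunct.contains cs[i] then (i : Int)
           else pvWalkR cs (cs.length : Int) ((i : Int) + 1)) by
      rw [pvWalkR, dif_pos (by exact_mod_cast hilt)]
      simp [pysem, List.getElem?_eq_getElem hilt]]
    by_cases hc : pvPunct.contains cs[i]
    · simp only [hc, if_pos]
      rw [if_pos ⟨by exact_mod_cast hst, by exact_mod_cast hmi⟩]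
    · simp only [hc, Bool.false_eq_true, if_false]
      rw [show ((i : Int) + 1) = ((i + 1 : Nat) : Int) by push_cast; ring]
      exact ih (i + 1) (by omega) (by omega) (by omega)


theorem pvScanHead (cs : List Char) (m : Nat) (hm : m < cs.length) :
    ∀ i st : Nat, i ≤ m + 1 →
      pvScan cs (m : Int) (PySem.List.enumerate (cs.drop i) (i : Int)) (st : Int) =
      pvScan cs (m : Int) (PySem.List.enumerate (cs.drop (m + 1)) ((m + 1 : Nat) : Int))
        ((pvStRun cs (m + 1) i st : Nat) : Int) := by
  intro i st him
  induction hni : m + 1 - i generalizing i st with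
  | zero =>
    have : i = m + 1 := by omega
    subst this
    rw [show pvStRun cs (m + 1) (m + 1) st = st by rw [pvStRun, dif_neg (by omega)]]
  | succ k ih =>
    have hile : i ≤ m := by omega
    have hilt : i < cs.length := by omega
    rw [pvDropSucc cs i hilt, pvEnumCons, pvScan]
    rw [pvStRun, dif_pos (by omega : i < m + 1), List.getElem?_eq_getElem hilt]
    by_cases hc : pvPunct.contains cs[i]
    · simp only [hc, if_pos]
      rw [if_neg (by push_cast; omega)]
      rw [show ((i : Int) + 1) = ((i + 1 : Nat) : Int) by push_cast; ring]
      exact ih (i + 1) (i + 1) (by omega) (by omega)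
    · simp only [hc, Bool.false_eq_true, if_false]
      rw [show ((i : Int) + 1) = ((i + 1 : Nat) : Int) by push_cast; ring]
      exact ih (i + 1) st (by omega) (by omega)

-- A's phase 2 equals B's pvBare
theorem pvPhase2Eq (cs : List Char) (cur : Int) (hcur : 0 ≤ cur) :
    (let mid := PySem.Chars.findFrom cs ['@'] cur none
     if 0 ≤ mid then
       (pvWalkR cs (cs.length : Int) mid,
        pvSplitHead (PySem.Chars.slice cs (some (pvWalkL cs mid + 1))
          (some (pvWalkR cs (cs.length : Int) mid))))
     else (-1, none)) = pvBare cs cur := by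
  simp only [pvBare]
  set mid := PySem.Chars.findFrom cs ['@'] cur none with hmid
  have hcases : mid = -1 ∨ (0 ≤ mid ∧ cs[mid.toNat]? = some '@') := by
    rw [hmid, pvFindFromUnfold cs ['@'] cur hcur]
    by_cases h1 : (cs.length : Int) < cur
    · rw [if_pos h1]; left; rfl
    · rw [if_neg h1]
      by_cases h2 : PySem.Chars.find (cs.drop cur.toNat) ['@'] = -1
      · rw [if_pos h2]; left; rfl
      · rw [if_neg h2]; right
        obtain ⟨h0, ha, _⟩ := pvFindSingleSpec (cs.drop cur.toNat) '@' h2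
        rw [List.getElem?_drop] at ha
        constructor
        · omega
        · rw [show (cur + PySem.Chars.find (cs.drop cur.toNat) ['@']).toNat =
                cur.toNat + (PySem.Chars.find (cs.drop cur.toNat) ['@']).toNat by omega]
          exact ha
  rcases hcases with h | ⟨h0, hat⟩
  · rw [h]; norm_num
  · rw [if_pos h0, if_neg (by omega : ¬ mid = -1)]
    set m := mid.toNat with hm
    have hmide : mid = (m : Int) := by omega
    have hmlt : m < cs.length := by
      have := List.getElem?_eq_some_iff.mp hat
      exact this.choose
    have hnat : ¬ pvPunct.contains '@' := by decide
    have hget : PySem.List.pyGet? cs (m : Int) = some '@' := by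
      simp [pysem, hat]
    -- B's scan, split at index m+1
    have hscan : pvScan cs mid (PySem.List.enumerate cs 0) 0 =
        (pvWalkR cs (cs.length : Int) ((m + 1 : Nat) : Int),
         pvSplitHead (PySem.Chars.slice cs
           (some ((pvStRun cs (m + 1) 0 0 : Nat) : Int))
           (some (pvWalkR cs (cs.length : Int) ((m + 1 : Nat) : Int))))) := by
      have hsh := pvScanHead cs m hmlt 0 0 (by omega)
      norm_num at hsh
      rw [hmide, hsh]
      have hstle : pvStRun cs (m + 1) 0 0 ≤ m := by
        have hb := pvStRunBridge cs (m + 1) (by omega)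
        have hw1 : pvWalkL cs (((m + 1 : Nat) : Int) - 1) = pvWalkL cs (m : Int) := by
          norm_num
        rw [hw1] at hb
        have hstep : pvWalkL cs (m : Int) = pvWalkL cs ((m : Int) - 1) := by
          rw [pvWalkL, dif_pos (by omega : (0:Int) ≤ (m : Int)), hget]
          simp only [if_neg (by decide : ¬ pvPunct.contains '@' = true)]
        have hle := pvWalkLLe cs ((m : Int) - 1)
        rw [hstep] at hb
        omega
      have hstt := pvScanTail cs m hmlt (m + 1) (pvStRun cs (m + 1) 0 0) (by omega) (by omega) hstle
      exact hstt
    rw [hscan]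
    -- A's walks
    have hwr : pvWalkR cs (cs.length : Int) mid = pvWalkR cs (cs.length : Int) ((m + 1 : Nat) : Int) := by
      rw [hmide, pvWalkR, dif_pos (by exact_mod_cast hmlt), hget]
      simp only [if_neg (by decide : ¬ pvPunct.contains '@' = true)]
      norm_num
    have hwl : pvWalkL cs mid + 1 = ((pvStRun cs (m + 1) 0 0 : Nat) : Int) := by
      have hb := pvStRunBridge cs (m + 1) (by omega)
      have hw1 : pvWalkL cs (((m + 1 : Nat) : Int) - 1) = pvWalkL cs (m : Int) := by
        norm_num
      rw [hw1] at hb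
      rw [hmide, hb]
    rw [hwr, hwl]

-- split₀.go never returns [] once a token, the current run or the accumulator is nonempty
theorem pvSplitGoNe : ∀ (t cur : List Char) (acc : List (List Char)),
    ((∃ c ∈ t, PySem.Chars.isspace c = false) ∨ cur ≠ [] ∨ acc ≠ []) →
    PySem.Chars.split₀.go t cur acc ≠ [] := by
  intro t
  induction t with
  | nil =>
    intro cur acc h
    rw [PySem.Chars.split₀.go]
    by_cases hc : cur.isEmpty
    · rw [if_pos hc]
      rcases h with ⟨c, hc', _⟩ | h | h
      · exact absurd hc' (List.not_mem_nil)
      · exact absurd (List.isEmpty_iff.mp hc) h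
      · simpa using h
    · rw [if_neg hc]
      simp
  | cons c rest ih =>
    intro cur acc h
    rw [PySem.Chars.split₀.go]
    by_cases hs : PySem.Chars.isspace c
    · rw [if_pos hs]
      by_cases hc : cur.isEmpty
      · rw [if_pos hc]
        apply ih
        rcases h with ⟨d, hd, hdd⟩ | h | h
        · rcases List.mem_cons.mp hd with rfl | hd'
          · rw [hs] at hdd; cases hdd
          · exact Or.inl ⟨d, hd', hdd⟩
        · exact absurd (List.isEmpty_iff.mp hc) h
        · exact Or.inr (Or.inr h)
      · rw [if_neg hc]
        exact ih [] _ (Or.inr (Or.inr (by simp)))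
    · rw [if_neg hs]
      exact ih (c :: cur) acc (Or.inr (Or.inl (by simp)))

-- a run containing '@' splits into at least one token, so `[0]` succeeds
theorem pvSplitHeadSome (t : List Char) (h : '@' ∈ t) :
    ∃ w, pvSplitHead t = some w := by
  have hne : PySem.Chars.split₀ t ≠ [] := by
    rw [PySem.Chars.split₀]
    exact pvSplitGoNe t [] [] (Or.inl ⟨'@', h, by decide⟩)
  cases hx : PySem.Chars.split₀ t with
  | nil => exact absurd hx hne
  | cons a rest =>
    exact ⟨String.mk a, by simp [pvSplitHead, hx, PySem.List.pyGet?, PySem.List.pyIdx?]⟩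

-- ===== VERDICT (by name: the statement is the Claim_ definition above) =====
theorem grep_one_email_id_spec : Claim_equal_grep_one_email_id := by
  intro s cur _ hpre
  have hcur : (0:Int) ≤ cur := hpre
  simp only [Spec_grep_one_email_id, grep_one_email_id, grep_one_email_id_alt]
  set cs := s.toList with hcs
  set L := PySem.Chars.findFrom cs ['<'] cur none with hL
  have hLspec := pvFindFromUnfold cs ['<'] cur hcur
  rw [← hL] at hLspec
  by_cases hln : L = -1
  · rw [if_neg (show ¬ cur ≤ L by rw [hln]; omega),
        if_neg (show ¬ L ≠ -1 by simp [hln])]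
    rw [if_pos rfl]
    exact pvPhase2Eq cs cur hcur
  · have hfacts : cur ≤ L ∧ cs[L.toNat]? = some '<' := by
      by_cases h1 : (cs.length : Int) < cur
      · rw [if_pos h1] at hLspec; exact absurd hLspec hln
      · rw [if_neg h1] at hLspec
        by_cases h2 : PySem.Chars.find (cs.drop cur.toNat) ['<'] = -1
        · rw [if_pos h2] at hLspec; exact absurd hLspec hln
        · rw [if_neg h2] at hLspec
          obtain ⟨h0, ha, _⟩ := pvFindSingleSpec _ '<' h2
          rw [List.getElem?_drop] at ha
          refine ⟨by omega, ?_⟩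
          rw [hLspec, show (cur + PySem.Chars.find (cs.drop cur.toNat) ['<']).toNat =
                cur.toNat + (PySem.Chars.find (cs.drop cur.toNat) ['<']).toNat by omega]
          exact ha
    obtain ⟨hcurL, hLat⟩ := hfacts
    have hL0 : (0:Int) ≤ L := le_trans hcur hcurL
    obtain ⟨hLlt, hLc⟩ := List.getElem?_eq_some_iff.mp hLat
    have hdropL : cs.drop L.toNat = '<' :: cs.drop (L.toNat + 1) := by
      rw [pvDropSucc cs L.toNat hLlt, hLc]
    rw [if_pos hcurL, if_pos hln]
    have hRB : PySem.Chars.findFrom cs ['>'] (L + 1) none = PySem.Chars.findFrom cs ['>'] L none := by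
      rw [pvFindFromUnfold cs ['>'] L hL0, pvFindFromUnfold cs ['>'] (L+1) (by omega)]
      rw [if_neg (by omega : ¬ (cs.length:Int) < L), if_neg (by omega : ¬ (cs.length:Int) < L + 1)]
      rw [show (L+1).toNat = L.toNat + 1 by omega]
      rw [hdropL, pvFindConsSingle '<' '>' _ (by decide)]
      by_cases h3 : PySem.Chars.find (cs.drop (L.toNat + 1)) ['>'] = -1
      · simp [h3]
      · simp only [h3, if_false]
        have := PySem.Chars.neg_one_le_find (cs.drop (L.toNat + 1)) ['>']
        split_ifs with h4
        · omega
        · omega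
    rw [hRB]
    set R := PySem.Chars.findFrom cs ['>'] L none with hR
    by_cases hRn : R = -1
    · rw [if_neg (show ¬ (L < R ∧ -1 < PySem.Chars.findFrom cs ['@'] L (some R)) by
            rw [hRn]; rintro ⟨h1, -⟩; omega),
          if_neg (show ¬ (R ≠ -1 ∧
              PySem.Chars.isIn ['@'] (PySem.Chars.slice cs (some (L+1)) (some R)) = true) by
            rintro ⟨h1, -⟩; exact h1 hRn)]
      rw [if_pos rfl]
      exact pvPhase2Eq cs cur hcur
    · have hRspec := pvFindFromUnfold cs ['>'] L hL0
      rw [← hR] at hRspec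
      rw [if_neg (by omega : ¬ (cs.length:Int) < L)] at hRspec
      have hRfacts : L < R ∧ cs[R.toNat]? = some '>' := by
        by_cases h4 : PySem.Chars.find (cs.drop L.toNat) ['>'] = -1
        · rw [if_pos h4] at hRspec; exact absurd hRspec hRn
        · rw [if_neg h4] at hRspec
          obtain ⟨h0, ha, _⟩ := pvFindSingleSpec _ '>' h4
          rw [List.getElem?_drop] at ha
          have hf0 : PySem.Chars.find (cs.drop L.toNat) ['>'] ≠ 0 := by
            intro h5
            rw [h5] at ha
            simp only [Int.toNat_zero, Nat.add_zero] at ha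
            rw [hLat] at ha
            cases ha
          refine ⟨by omega, ?_⟩
          rw [hRspec, show (L + PySem.Chars.find (cs.drop L.toNat) ['>']).toNat =
                L.toNat + (PySem.Chars.find (cs.drop L.toNat) ['>']).toNat by omega]
          exact ha
      obtain ⟨hLR, hRat⟩ := hRfacts
      obtain ⟨hRlt, hRc⟩ := List.getElem?_eq_some_iff.mp hRat
      have hgate : (L < R ∧ -1 < PySem.Chars.findFrom cs ['@'] L (some R)) ↔
          (R ≠ -1 ∧ PySem.Chars.isIn ['@'] (PySem.Chars.slice cs (some (L+1)) (some R)) = true) := by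
        rw [pvFindFromEndUnfold cs ['@'] L R hL0 (by omega) (by omega)]
        have hteq : (cs.take R.toNat).drop L.toNat =
            '<' :: (cs.drop (L.toNat + 1)).take (R.toNat - (L.toNat + 1)) := by
          rw [pvDropSucc (cs.take R.toNat) L.toNat
                (by rw [List.length_take]; omega),
              List.getElem_take, hLc, List.drop_take]
        have hmemiff : PySem.Chars.find ((cs.take R.toNat).drop L.toNat) ['@'] ≠ -1 ↔
            '@' ∈ (cs.drop (L.toNat + 1)).take (R.toNat - (L.toNat + 1)) := by
          rw [Ne, pvFindSingleNeg, not_not, hteq, List.mem_cons]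
          simp
        have hsl : PySem.Chars.slice cs (some (L+1)) (some R) =
            (cs.drop (L+1).toNat).take (R.toNat - (L+1).toNat) := by
          exact pvSliceEq cs (L+1) R (by omega) (by omega) (by omega) (by omega)
        constructor
        · rintro ⟨-, h6⟩
          refine ⟨hRn, ?_⟩
          rw [PySem.Chars.isIn_iff_infix, List.singleton_infix_iff, hsl,
              show (L+1).toNat = L.toNat + 1 by omega]
          apply hmemiff.mp
          intro h7
          rw [if_pos h7] at h6
          omega
        · rintro ⟨-, h6⟩
          refine ⟨hLR, ?_⟩
          rw [PySem.Chars.isIn_iff_infix, List.singleton_infix_iff, hsl,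
              show (L+1).toNat = L.toNat + 1 by omega] at h6
          have h7 := hmemiff.mpr h6
          rw [if_neg h7]
          have := PySem.Chars.neg_one_le_find ((cs.take R.toNat).drop L.toNat) ['@']
          omega
      by_cases hga : L < R ∧ -1 < PySem.Chars.findFrom cs ['@'] L (some R)
      · rw [if_pos hga, if_pos (hgate.mp hga)]
        have hmem : '@' ∈ PySem.Chars.slice cs (some (L+1)) (some R) := by
          have h8 := (hgate.mp hga).2
          rw [PySem.Chars.isIn_iff_infix, List.singleton_infix_iff] at h8
          exact h8
        obtain ⟨w, hw⟩ := pvSplitHeadSome _ hmem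
        have hw' : pvSplitHead (PySem.List.slice cs (some (L + 1)) (some R)) = some w := by
          simpa [PySem.Chars.slice_eq_listSlice] using hw
        simp [hw']
      · rw [if_neg hga,
            if_neg (show ¬ (R ≠ -1 ∧
                PySem.Chars.isIn ['@'] (PySem.Chars.slice cs (some (L+1)) (some R)) = true) from
              fun hc => hga (hgate.mpr hc))]
        rw [if_pos rfl]
        exact pvPhase2Eq cs cur hcur
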